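-- pv_equiv track=rewrite | github.com/ipetrushenko-softheme/codejam | contests/605/C.py | solve
-- ===== SOURCE A (Python) =====
-- def solve(s, chars):
--     cnt = 0
--     n = len(s)
--     unique = set(chars)
--     i = 0
--     while i < n:
--         j = i
--         while j < n and s[j] in unique:
--             j += 1
--         diff = j - i
--         cnt += diff * (diff + 1) // 2
--         if i != j:
--             i = j
--         else:
--             i += 1
--     return cnt
-- ===== SOURCE B (Python) =====
-- def solve(s, chars):
--     unique = set(chars)
--     cnt = 0
--     run = 0
--     for c in s:
--         if c in unique:
--             run += 1
--         else:
--             run = 0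
--         cnt += run
--     return cnt
-- ===== Notes on version B (the rewrite author's own statement) =====
-- stated objective: simpler
-- what changed: Replaced the nested while loops and closed-form run*(run+1)//2 block arithmetic by a single for-loop with a running 'substrings ending here' counter added at every position.
import Mathlib
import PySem

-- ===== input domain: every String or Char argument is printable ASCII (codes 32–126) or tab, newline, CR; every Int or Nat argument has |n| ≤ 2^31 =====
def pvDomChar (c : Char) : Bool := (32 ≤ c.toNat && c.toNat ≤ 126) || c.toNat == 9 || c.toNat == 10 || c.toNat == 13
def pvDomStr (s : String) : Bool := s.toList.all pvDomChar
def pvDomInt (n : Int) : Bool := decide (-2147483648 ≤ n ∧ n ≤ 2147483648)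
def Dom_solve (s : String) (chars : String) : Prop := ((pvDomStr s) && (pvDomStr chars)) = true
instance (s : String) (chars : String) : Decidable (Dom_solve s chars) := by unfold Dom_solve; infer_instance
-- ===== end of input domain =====

-- B replaces A's nested while loops and per-block run*(run+1)//2 arithmetic by one pass
-- adding a running "substrings ending here" counter (objective: simpler).


-- ===== PORT A =====
-- inner 'while j < n and s[j] in unique: j += 1' — length of the scanned run from the current position
def solveInner (uniq : PySem.Set Char) : List Char → Nat
  | [] => 0
  | c :: t => if PySem.Set.contains uniq c then solveInner uniq t + 1 else 0

-- outer 'while i < n' loop, over the suffix of s starting at i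
def solveOuter (uniq : PySem.Set Char) (cnt : Int) : List Char → Int
  | [] => cnt
  | c :: t =>
      let diff := solveInner uniq (c :: t)
      let cnt' := cnt + PySem.Int.floordiv ((diff : Int) * ((diff : Int) + 1)) 2
      if _h : diff ≠ 0 then solveOuter uniq cnt' ((c :: t).drop diff)
      else solveOuter uniq cnt' t
  termination_by l => l.length
  decreasing_by
    · simp only [List.length_drop]; simp only [List.length_cons]; omega
    · simp

def solve (s : String) (chars : String) : Int :=
  solveOuter (PySem.Set.ofList chars.toList) 0 s.toList

-- ===== PORT B =====
def solveStep (uniq : PySem.Set Char) (st : Int × Int) (c : Char) : Int × Int :=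
  let run := if PySem.Set.contains uniq c then st.2 + 1 else 0
  (st.1 + run, run)

def solve_alt (s : String) (chars : String) : Int :=
  let uniq := PySem.Set.ofList chars.toList
  (s.toList.foldl (solveStep uniq) (0, 0)).1

-- ===== PRECONDITION & SPEC =====
def Spec_solve (s : String) (chars : String) (out : Int) : Prop := out = solve_alt s chars
instance (s : String) (chars : String) (out : Int) : Decidable (Spec_solve s chars out) := by unfold Spec_solve; infer_instance

-- ===== CLAIM (what is proved, stated in full; the proofs are below) =====
def Claim_equal_solve : Prop := ∀ (s : String) (chars : String), Dom_solve s chars → Spec_solve s chars (solve s chars)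

-- ===== LEMMAS AND PROOFS =====

-- B's fold over an all-allowed prefix of length m adds run+1, run+2, …, run+m
theorem foldl_allowed (uniq : PySem.Set Char) (l : List Char) (cnt run : Int)
    (h : ∀ c ∈ l, PySem.Set.contains uniq c = true) :
    l.foldl (solveStep uniq) (cnt, run)
      = (cnt + l.length * run + l.length * (l.length + 1) / 2, run + l.length) := by
  induction l generalizing cnt run with
  | nil => simp
  | cons c t ih =>
      simp only [List.foldl_cons, solveStep, h c (by simp)]
      rw [ih _ _ (fun x hx => h x (by simp [hx]))]
      have ht : ((t.length : Int) + 1) * ((t.length : Int) + 2) / 2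
          = (t.length : Int) * ((t.length : Int) + 1) / 2 + ((t.length : Int) + 1) := by
        have h2 : ((t.length : Int) + 1) * ((t.length : Int) + 2)
            = (t.length : Int) * ((t.length : Int) + 1) + 2 * ((t.length : Int) + 1) := by ring
        omega
      rw [Prod.mk.injEq]
      simp only [List.length_cons]
      push_cast
      rw [show ((t.length : Int) + 1 + 1) = ((t.length : Int) + 2) by ring, ht]
      constructor
      · linarith
      · ring

-- resetting: if the head is disallowed, the run state is irrelevant
theorem foldl_reset (uniq : PySem.Set Char) (c : Char) (t : List Char) (cnt run : Int)
    (h : PySem.Set.contains uniq c = false) :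
    (c :: t).foldl (solveStep uniq) (cnt, run) = t.foldl (solveStep uniq) (cnt, 0) := by
  have hm : c ∉ uniq := by
    intro hmem
    rw [(PySem.Set.contains_iff uniq _).mpr hmem] at h
    cases h
  simp [solveStep, hm]

theorem solveInner_eq_takeWhile (uniq : PySem.Set Char) (l : List Char) :
    solveInner uniq l = (l.takeWhile (fun c => PySem.Set.contains uniq c)).length := by
  induction l with
  | nil => rfl
  | cons c t ih =>
      by_cases h : PySem.Set.contains uniq c = true
      · have hm : c ∈ uniq := (PySem.Set.contains_iff uniq c).mp h
        simp [solveInner, hm, ih]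
      · have hm : c ∉ uniq := by
          intro hmem
          rw [(PySem.Set.contains_iff uniq _).mpr hmem] at h
          exact h rfl
        simp [solveInner, hm]

theorem main_lemma (uniq : PySem.Set Char) (l : List Char) (cnt : Int) :
    solveOuter uniq cnt l = (l.foldl (solveStep uniq) (cnt, 0)).1 := by
  induction hn : l.length using Nat.strong_induction_on generalizing l cnt with
  | _ n ih =>
  match l with
  | [] => simp [solveOuter]
  | c :: t =>
    simp only [List.length_cons] at hn
    rw [solveOuter]
    set tk := (c :: t).takeWhile (fun c => PySem.Set.contains uniq c) with htk
    have hinner : solveInner uniq (c :: t) = tk.length := solveInner_eq_takeWhile uniq _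
    by_cases h0 : solveInner uniq (c :: t) = 0
    · -- head disallowed
      have hc : PySem.Set.contains uniq c = false := by
        by_contra hc'
        simp only [Bool.not_eq_false] at hc'
        have he : solveInner uniq (c :: t) = solveInner uniq t + 1 := by
          simp [solveInner, (PySem.Set.contains_iff uniq c).mp hc']
        omega
      simp only [h0]
      rw [dif_neg (by omega)]
      have hz : PySem.Int.floordiv ((((0:Nat)) : Int) * ((((0:Nat)) : Int) + 1)) 2 = 0 := by
        decide
      rw [hz, add_zero, ih t.length (by omega) t _ rfl, foldl_reset uniq c t _ _ hc]
    · -- run of length diff > 0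
      have hdpos : 0 < tk.length := by omega
      simp only [dif_pos h0]
      have hsplit : c :: t = tk ++ (c :: t).dropWhile (fun c => PySem.Set.contains uniq c) := by
        rw [htk]; exact (List.takeWhile_append_dropWhile).symm
      set rest := (c :: t).dropWhile (fun c => PySem.Set.contains uniq c) with hrest
      have hdrop : (c :: t).drop (solveInner uniq (c :: t)) = rest := by
        rw [hinner]
        conv_lhs => rw [hsplit]
        simp
      rw [hdrop]
      have hlen : tk.length + rest.length = n := by
        have hlsp := congrArg List.length hsplit
        simp only [List.length_append, List.length_cons] at hlsp
        omega
      have hrl : rest.length < n := by omega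
      rw [ih rest.length hrl rest _ rfl]
      conv_rhs => rw [hsplit, List.foldl_append]
      rw [foldl_allowed uniq tk _ _ (fun x hx => List.mem_takeWhile_imp hx)]
      have hrest_fold : ∀ (a b : Int), (rest.foldl (solveStep uniq) (a, b)).1
          = (rest.foldl (solveStep uniq) (a, 0)).1 := by
        intro a b
        match hr : rest with
        | [] => simp
        | d :: r =>
            have hd : PySem.Set.contains uniq d = false := by
              have hh := List.head?_dropWhile_not
                (p := fun c => PySem.Set.contains uniq c) (l := c :: t)
              rw [← hrest] at hh
              simpa using hh
            rw [foldl_reset uniq d r _ _ hd, foldl_reset uniq d r _ _ hd]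
      conv_rhs => rw [hrest_fold]
      congr 2
      rw [hinner, PySem.Int.floordiv_eq_ediv_of_pos (by omega), mul_zero, add_zero]

-- ===== VERDICT (by name: the statement is the Claim_ definition above) =====
theorem solve_spec : Claim_equal_solve := by
  intro s chars _
  unfold Spec_solve solve solve_alt
  exact main_lemma _ _ _
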